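-- pv_equiv track=rewrite | github.com/abhishek18124/PyAug2025 | Lecture 25/003wines_problem_topdown_state_opt.py | f_topdown
-- ===== SOURCE A (Python) =====
-- def f_topdown(p: list[int], i: int, j: int, dp: list[list[int]]) -> int:
--     n = len(p)
--     y = n - j + i
--
--     # lookup
--     if dp[i][j] != -1:
--         return dp[i][j]
--
--     # base case
--
--     if i == j:  # y == n
--         dp[i][j] = y * p[i]
--         return dp[i][j]
--
--     # recursive case
--
--     # f(i, j) = it is a fn that finds the max. profit we
--     # can make from wines[i...j] s.t. we are in year y
--
--     # decide for the yth year
--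
--     # option 1 : sell the ith bottle of wine
--
--     # option 2 : sell the jth bottle of wine
--
--     dp[i][j] = max(
--         y * p[i] + f_topdown(p, i + 1, j, dp),
--         y * p[j] + f_topdown(p, i, j - 1, dp),
--     )
--
--     return dp[i][j]
-- ===== SOURCE B (Python) =====
-- def f_topdown(p: list[int], i: int, j: int, dp: list[list[int]]) -> int:
--     n = len(p)
--     if dp[i][j] != -1:
--         return dp[i][j]
--     for a in range(i, j + 1):
--         if dp[a][a] == -1:
--             dp[a][a] = n * p[a]
--     for g in range(1, j - i + 1):
--         for a in range(i, j - g + 1):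
--             b = a + g
--             if dp[a][b] == -1:
--                 y = n - b + a
--                 dp[a][b] = max(y * p[a] + dp[a + 1][b], y * p[b] + dp[a][b - 1])
--     return dp[i][j]
-- ===== Notes on version B (the rewrite author's own statement) =====
-- stated objective: alternative
-- what changed: Replaces the memoized top-down recursion with an explicit bottom-up tabulation over the same dp table: fill the diagonal, then fill the triangle i..j in increasing gap order, skipping pre-set (non -1) cells; same return value, no recursion.
-- outside the precondition, e.g. on f_topdown([1, 2], -2, 1, [[-1, -1], [-1, -1]]): A returns 4, B returns 5
import Mathlib
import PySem

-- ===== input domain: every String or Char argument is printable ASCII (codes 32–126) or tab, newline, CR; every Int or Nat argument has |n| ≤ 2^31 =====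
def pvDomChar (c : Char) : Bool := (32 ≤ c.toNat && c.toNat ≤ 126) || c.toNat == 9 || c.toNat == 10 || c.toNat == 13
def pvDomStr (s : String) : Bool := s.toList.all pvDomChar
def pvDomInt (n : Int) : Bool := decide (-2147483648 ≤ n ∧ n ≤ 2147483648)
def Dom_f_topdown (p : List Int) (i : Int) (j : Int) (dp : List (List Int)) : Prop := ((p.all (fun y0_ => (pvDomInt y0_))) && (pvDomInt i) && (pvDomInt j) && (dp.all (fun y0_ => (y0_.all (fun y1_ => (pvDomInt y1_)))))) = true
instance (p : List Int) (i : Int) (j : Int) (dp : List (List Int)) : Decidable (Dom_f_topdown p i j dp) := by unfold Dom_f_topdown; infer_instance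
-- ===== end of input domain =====

-- B replaces A's memoized top-down recursion by a bottom-up gap-order tabulation over the same
-- table, honouring pre-set (non -1) cells; equal RETURN value is what is proved — both Pythons
-- mutate dp, but B may fill triangle cells A's lazy recursion never reaches.

-- dp[a][b] read; the .getD defaults are never reached under Pre_ (indices in range, nonnegative)
def pvRow (dp : List (List Int)) (a : Int) : List Int := (PySem.List.pyGet? dp a).getD []
def pvCell (dp : List (List Int)) (a b : Int) : Int := (PySem.List.pyGet? (pvRow dp a) b).getD 0
-- dp[a][b] = v; PySem.List.pySetD is exact under Pre_ (indices in range)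
def pvSet (dp : List (List Int)) (a b : Int) (v : Int) : List (List Int) :=
  PySem.List.pySetD dp a (PySem.List.pySetD (pvRow dp a) b v)

-- ===== PORT A =====
-- A's recursion, fuel-guarded for totality only: depth j-i suffices, the wrapper supplies it
def pvFA : Nat → List Int → Int → Int → List (List Int) → Int × List (List Int)
  | 0, _, _, _, dp => (0, dp)
  | (fuel+1), p, i, j, dp =>
    let n : Int := p.length
    let y : Int := n - j + i
    if pvCell dp i j ≠ -1 then
      (pvCell dp i j, dp)
    else if i = j then
      let dp' := pvSet dp i j (y * PySem.List.pyGetD p i 0)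
      (pvCell dp' i j, dp')
    else
      let r1 := pvFA fuel p (i + 1) j dp
      let r2 := pvFA fuel p i (j - 1) r1.2
      let v := max (y * PySem.List.pyGetD p i 0 + r1.1) (y * PySem.List.pyGetD p j 0 + r2.1)
      let dp' := pvSet r2.2 i j v
      (pvCell dp' i j, dp')

def f_topdown (p : List Int) (i : Int) (j : Int) (dp : List (List Int)) : Int :=
  (pvFA ((j - i).toNat + 1) p i j dp).1

-- ===== PORT B =====
-- for a in range(i, j+1): if dp[a][a] == -1: dp[a][a] = n * p[a]
-- (the Nat argument is fuel for totality only; the wrappers below supply exactly the loop length)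
def pvBDiag : Nat → List Int → Int → Int → List (List Int) → List (List Int)
  | 0, _, _, _, dp => dp
  | (k+1), p, j, a, dp =>
    if a <= j then
      pvBDiag k p j (a + 1)
        (if pvCell dp a a = -1 then
          pvSet dp a a ((p.length : Int) * PySem.List.pyGetD p a 0) else dp)
    else dp

-- for a in range(i, hi+1) with hi = j - g: fill dp[a][a+g] if unset
def pvBInner : Nat → List Int → Int → Int → Int → List (List Int) → List (List Int)
  | 0, _, _, _, _, dp => dp
  | (k+1), p, g, hi, a, dp =>
    if a <= hi then
      pvBInner k p g hi (a + 1)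
        (if pvCell dp a (a + g) = -1 then
          pvSet dp a (a + g)
            (max (((p.length : Int) - (a + g) + a) * PySem.List.pyGetD p a 0 + pvCell dp (a + 1) (a + g))
                 (((p.length : Int) - (a + g) + a) * PySem.List.pyGetD p (a + g) 0 + pvCell dp a (a + g - 1)))
         else dp)
    else dp

-- for g in range(1, j-i+1): inner loop over a in range(i, j-g+1)
def pvBGaps : Nat → List Int → Int → Int → Int → List (List Int) → List (List Int)
  | 0, _, _, _, _, dp => dp
  | (k+1), p, i, j, g, dp =>
    if g <= j - i then
      pvBGaps k p i j (g + 1) (pvBInner (j - g + 1 - i).toNat p g (j - g) i dp)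
    else dp

def f_topdown_alt (p : List Int) (i : Int) (j : Int) (dp : List (List Int)) : Int :=
  if pvCell dp i j ≠ -1 then pvCell dp i j
  else pvCell (pvBGaps (j - i).toNat p i j 1 (pvBDiag (j + 1 - i).toNat p j i dp)) i j

-- ===== PRECONDITION & SPEC =====
-- Pre_: either the memo lookup hits (dp[i][j] is in range and already set, any indices — both
-- programs just return it), or the natural call shape: a nonnegative triangle 0 ≤ i ≤ j < len(p)
-- with a table whose rows cover column j.  It narrows: A also returns on some excluded inputs —
-- indices outside the triangle (negative-index wraparound, inverted ranges) whose dp[i][j] is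
-- still -1 but whose recursion bottoms out on pre-filled cells (see the cite); those accidental
-- shapes are outside the function's intended domain.
def Pre_f_topdown (p : List Int) (i : Int) (j : Int) (dp : List (List Int)) : Prop :=
  (PySem.Raise.InRange dp.length i ∧ PySem.Raise.InRange (pvRow dp i).length j ∧
    pvCell dp i j ≠ -1) ∨
  (0 ≤ i ∧ i ≤ j ∧ j < (p.length : Int) ∧ j < (dp.length : Int) ∧
    ∀ row ∈ dp, j < (row.length : Int))
instance (p : List Int) (i : Int) (j : Int) (dp : List (List Int)) : Decidable (Pre_f_topdown p i j dp) := by unfold Pre_f_topdown; infer_instance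

def pvWitness_f_topdown : List Int × Int × Int × List (List Int) :=
  ([2, 3, 5], 0, 2, [[-1, -1, -1], [-1, -1, -1], [-1, -1, -1]])

def Spec_f_topdown (p : List Int) (i : Int) (j : Int) (dp : List (List Int)) (out : Int) : Prop := out = f_topdown_alt p i j dp
instance (p : List Int) (i : Int) (j : Int) (dp : List (List Int)) (out : Int) : Decidable (Spec_f_topdown p i j dp out) := by unfold Spec_f_topdown; infer_instance

-- ===== CLAIM (what is proved, stated in full; the proofs are below) =====
def Claim_equal_f_topdown : Prop := ∀ (p : List Int) (i : Int) (j : Int) (dp : List (List Int)), Dom_f_topdown p i j dp → Pre_f_topdown p i j dp → Spec_f_topdown p i j dp (f_topdown p i j dp)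

-- ===== LEMMAS AND PROOFS =====

-- the common value both programs compute for cell (a,b) of the ORIGINAL table dp
def pvVal (p : List Int) (dp : List (List Int)) (a b : Int) : Int :=
  if pvCell dp a b ≠ -1 then pvCell dp a b
  else if a = b then (p.length : Int) * PySem.List.pyGetD p a 0
  else if h : a < b then
    max (((p.length : Int) - b + a) * PySem.List.pyGetD p a 0 + pvVal p dp (a + 1) b)
        (((p.length : Int) - b + a) * PySem.List.pyGetD p b 0 + pvVal p dp a (b - 1))
  else 0
termination_by (b - a).toNat
decreasing_by all_goals omega

theorem pvVal_hit (p : List Int) (dp : List (List Int)) (a b : Int) (h : pvCell dp a b ≠ -1) :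
    pvVal p dp a b = pvCell dp a b := by
  rw [pvVal.eq_def, if_pos h]

theorem pvVal_diag (p : List Int) (dp : List (List Int)) (a : Int) (h : pvCell dp a a = -1) :
    pvVal p dp a a = (p.length : Int) * PySem.List.pyGetD p a 0 := by
  rw [pvVal.eq_def, if_neg (not_not_intro h), if_pos rfl]

theorem pvVal_rec (p : List Int) (dp : List (List Int)) (a b : Int) (h : pvCell dp a b = -1)
    (hlt : a < b) :
    pvVal p dp a b =
      max (((p.length : Int) - b + a) * PySem.List.pyGetD p a 0 + pvVal p dp (a + 1) b)
          (((p.length : Int) - b + a) * PySem.List.pyGetD p b 0 + pvVal p dp a (b - 1)) := by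
  rw [pvVal.eq_def, if_neg (not_not_intro h), if_neg (by omega : ¬ a = b), dif_pos hlt]

theorem length_pvSet (dp : List (List Int)) (a b v : Int) : (pvSet dp a b v).length = dp.length := by
  simp [pvSet, PySem.List.length_pySetD]

theorem pvRow_mem (dp : List (List Int)) (a : Int) (ha : 0 <= a) (hlt : a < (dp.length : Int)) :
    pvRow dp a ∈ dp := by
  have h1 : a.toNat < dp.length := by omega
  unfold pvRow
  rw [PySem.List.pyGet?_of_nonneg dp ha, List.getElem?_eq_getElem h1]
  simpa using List.getElem_mem h1

theorem pvRow_pvSet (dp : List (List Int)) (a b v a' : Int) (ha : 0 <= a) (ha' : 0 <= a')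
    (hlt : a < (dp.length : Int)) :
    pvRow (pvSet dp a b v) a' =
      if a' = a then PySem.List.pySetD (pvRow dp a) b v else pvRow dp a' := by
  have h1 : a.toNat < dp.length := by omega
  by_cases h : a' = a
  · rw [if_pos h, h]
    unfold pvRow pvSet
    rw [PySem.List.pySetD_of_nonneg dp _ ha]
    rw [PySem.List.pyGet?_of_nonneg _ ha, List.getElem?_set, if_pos rfl, if_pos h1]
    rfl
  · rw [if_neg h]
    unfold pvRow pvSet
    rw [PySem.List.pySetD_of_nonneg dp _ ha]
    rw [PySem.List.pyGet?_of_nonneg _ ha', List.getElem?_set,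
      if_neg (by omega : ¬ a.toNat = a'.toNat)]
    rw [PySem.List.pyGet?_of_nonneg dp ha']

theorem length_pvRow_pvSet (dp : List (List Int)) (a b v a' : Int) (ha : 0 <= a) (ha' : 0 <= a')
    (hlt : a < (dp.length : Int)) :
    (pvRow (pvSet dp a b v) a').length = (pvRow dp a').length := by
  rw [pvRow_pvSet dp a b v a' ha ha' hlt]
  by_cases h : a' = a
  · rw [if_pos h, PySem.List.length_pySetD, h]
  · rw [if_neg h]

theorem pvCell_pvSet (dp : List (List Int)) (a b v a' b' : Int) (ha : 0 <= a) (hb : 0 <= b)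
    (ha' : 0 <= a') (hb' : 0 <= b') (hlt : a < (dp.length : Int))
    (hbl : b < ((pvRow dp a).length : Int)) :
    pvCell (pvSet dp a b v) a' b' = if a' = a ∧ b' = b then v else pvCell dp a' b' := by
  have hrow := pvRow_pvSet dp a b v a' ha ha' hlt
  by_cases h : a' = a
  · rw [if_pos h] at hrow
    unfold pvCell
    rw [hrow, PySem.List.pySetD_of_nonneg _ _ hb, PySem.List.pyGet?_of_nonneg _ hb',
      List.getElem?_set]
    by_cases h2 : b' = b
    · rw [if_pos (by omega : b.toNat = b'.toNat), if_pos (by omega : b.toNat < (pvRow dp a).length),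
        if_pos ⟨h, h2⟩]
      rfl
    · rw [if_neg (by omega : ¬ b.toNat = b'.toNat), if_neg (by tauto : ¬ (a' = a ∧ b' = b))]
      rw [h, PySem.List.pyGet?_of_nonneg _ hb']
  · rw [if_neg h] at hrow
    rw [if_neg (by tauto : ¬ (a' = a ∧ b' = b))]
    unfold pvCell
    rw [hrow]

-- the memo table t agrees with dp0 cell-wise: untouched, or a -1 cell overwritten by its value
def pvAgrees (p : List Int) (dp0 t : List (List Int)) : Prop :=
  t.length = dp0.length ∧
  (∀ a : Int, 0 <= a → (pvRow t a).length = (pvRow dp0 a).length) ∧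
  (∀ a b : Int, 0 <= a → 0 <= b →
     pvCell t a b = pvCell dp0 a b ∨
     (pvCell dp0 a b = -1 ∧ a <= b ∧ pvCell t a b = pvVal p dp0 a b))

theorem pvFA_spec (p : List Int) (dp0 : List (List Int)) :
    ∀ (fuel : Nat) (a b : Int) (t : List (List Int)), pvAgrees p dp0 t →
      0 <= a → a <= b → b < (p.length : Int) → b < (dp0.length : Int) →
      (∀ r ∈ dp0, b < (r.length : Int)) → (b - a).toNat < fuel →
      (pvFA fuel p a b t).1 = pvVal p dp0 a b ∧ pvAgrees p dp0 (pvFA fuel p a b t).2 := by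
  intro fuel
  induction fuel with
  | zero => intro a b t _ _ _ _ _ _ hf; omega
  | succ fuel ih =>
    intro a b t hag ha hab hbp hbd hrows hf
    obtain ⟨hlen, hrlen, hcells⟩ := hag
    have hb0 : (0:Int) <= b := le_trans ha hab
    have hat : a < ((t.length : Nat) : Int) := by rw [hlen]; omega
    have hbt : b < ((pvRow t a).length : Int) := by
      rw [hrlen a ha]; exact hrows _ (pvRow_mem dp0 a ha (by omega))
    by_cases hC : pvCell t a b = -1
    · have h0 : pvCell dp0 a b = -1 := by
        rcases hcells a b ha hb0 with heq | ⟨h0, _, _⟩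
        · rw [heq] at hC; exact hC
        · exact h0
      by_cases hab' : a = b
      · simp only [pvFA]
        rw [if_neg (not_not_intro hC)]
        rw [if_pos hab']
        have hset := pvCell_pvSet t a b (((p.length : Int) - b + a) * PySem.List.pyGetD p a 0)
          a b ha hb0 ha hb0 hat hbt
        rw [if_pos ⟨rfl, rfl⟩] at hset
        have h0' := h0
        rw [← hab'] at h0'
        have hvv : pvVal p dp0 a b =
            ((p.length : Int) - b + a) * PySem.List.pyGetD p a 0 := by
          rw [← hab', pvVal_diag p dp0 a h0']; ring
        constructor
        · rw [hset, hvv]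
        · refine ⟨by rw [length_pvSet, hlen], ?_, ?_⟩
          · intro a'' ha''
            rw [length_pvRow_pvSet t a b _ a'' ha ha'' hat]
            exact hrlen a'' ha''
          · intro a' b' ha' hb'
            rw [pvCell_pvSet t a b _ a' b' ha hb0 ha' hb' hat hbt]
            by_cases hp : a' = a ∧ b' = b
            · obtain ⟨h1, h2⟩ := hp
              rw [if_pos ⟨h1, h2⟩, h1, h2]
              exact Or.inr ⟨h0, hab, hvv.symm⟩
            · rw [if_neg hp]; exact hcells a' b' ha' hb'
      · have hlt2 : a < b := lt_of_le_of_ne hab hab'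
        obtain ⟨hv1, hag1⟩ := ih (a + 1) b t ⟨hlen, hrlen, hcells⟩ (by omega) (by omega) hbp hbd
          hrows (by omega)
        obtain ⟨hv2, hag2⟩ := ih a (b - 1) (pvFA fuel p (a + 1) b t).2 hag1 ha (by omega)
          (by omega) (by omega) (fun r hr => by have := hrows r hr; omega) (by omega)
        obtain ⟨hlen2, hrlen2, hcells2⟩ := hag2
        have hat2 : a < (((pvFA fuel p a (b - 1) (pvFA fuel p (a + 1) b t).2).2.length : Nat) : Int) := by
          rw [hlen2]; omega
        have hbt2 : b < ((pvRow (pvFA fuel p a (b - 1) (pvFA fuel p (a + 1) b t).2).2 a).length : Int) := by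
          rw [hrlen2 a ha]; exact hrows _ (pvRow_mem dp0 a ha (by omega))
        simp only [pvFA]
        rw [if_neg (not_not_intro hC), if_neg hab']
        rw [hv1, hv2]
        have hset := pvCell_pvSet (pvFA fuel p a (b - 1) (pvFA fuel p (a + 1) b t).2).2 a b
          (max (((p.length : Int) - b + a) * PySem.List.pyGetD p a 0 + pvVal p dp0 (a + 1) b)
               (((p.length : Int) - b + a) * PySem.List.pyGetD p b 0 + pvVal p dp0 a (b - 1)))
          a b ha hb0 ha hb0 hat2 hbt2
        have hveq := pvVal_rec p dp0 a b h0 hlt2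
        constructor
        · rw [if_pos ⟨rfl, rfl⟩] at hset
          rw [hset, hveq]
        · refine ⟨by rw [length_pvSet, hlen2], ?_, ?_⟩
          · intro a'' ha''
            rw [length_pvRow_pvSet _ a b _ a'' ha ha'' hat2]
            exact hrlen2 a'' ha''
          · intro a' b' ha' hb'
            rw [pvCell_pvSet _ a b _ a' b' ha hb0 ha' hb' hat2 hbt2]
            by_cases hp : a' = a ∧ b' = b
            · obtain ⟨h1, h2⟩ := hp
              rw [if_pos ⟨h1, h2⟩, h1, h2]
              exact Or.inr ⟨h0, le_of_lt hlt2, hveq.symm⟩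
            · rw [if_neg hp]; exact hcells2 a' b' ha' hb'
    · have hC' : pvCell t a b ≠ -1 := hC
      simp only [pvFA]
      rw [if_pos hC']
      refine ⟨?_, ⟨hlen, hrlen, hcells⟩⟩
      rcases hcells a b ha hb0 with heq | ⟨h0, _, hval⟩
      · rw [heq]; rw [pvVal_hit p dp0 a b (by rw [heq] at hC'; exact hC')]
      · exact hval

-- B-side loop invariant: triangle cells up to (gap g, start a0) hold their value, the rest untouched
def pvBInv (p : List Int) (dp0 : List (List Int)) (i j g a0 : Int) (t : List (List Int)) : Prop :=
  t.length = dp0.length ∧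
  (∀ a : Int, 0 <= a → (pvRow t a).length = (pvRow dp0 a).length) ∧
  (∀ a b : Int, 0 <= a → 0 <= b →
     pvCell t a b =
       if i <= a ∧ a <= b ∧ b <= j ∧ (b - a < g ∨ (b - a = g ∧ a < a0)) then pvVal p dp0 a b
       else pvCell dp0 a b)

theorem pvBInv_congr (p : List Int) (dp0 : List (List Int)) (i j g a0 g' a0' : Int)
    (t : List (List Int))
    (hiff : ∀ a b : Int, (i <= a ∧ a <= b ∧ b <= j ∧ (b - a < g ∨ (b - a = g ∧ a < a0))) ↔
                         (i <= a ∧ a <= b ∧ b <= j ∧ (b - a < g' ∨ (b - a = g' ∧ a < a0')))) :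
    pvBInv p dp0 i j g a0 t → pvBInv p dp0 i j g' a0' t := by
  rintro ⟨h1, h2, h3⟩
  refine ⟨h1, h2, fun a b ha hb => ?_⟩
  rw [h3 a b ha hb]
  by_cases hc : i <= a ∧ a <= b ∧ b <= j ∧ (b - a < g ∨ (b - a = g ∧ a < a0))
  · rw [if_pos hc, if_pos ((hiff a b).mp hc)]
  · rw [if_neg hc, if_neg (fun hc' => hc ((hiff a b).mpr hc'))]

theorem pvBDiag_spec (p : List Int) (dp0 : List (List Int)) (i j : Int)
    (hi : 0 <= i) (hj : j < (p.length : Int)) (hjd : j < (dp0.length : Int))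
    (hrows : ∀ r ∈ dp0, j < (r.length : Int)) :
    ∀ (k : Nat) (a0 : Int) (t : List (List Int)), (j + 1 - a0).toNat <= k → i <= a0 →
      pvBInv p dp0 i j 0 a0 t → pvBInv p dp0 i j 0 (j + 1) (pvBDiag k p j a0 t) := by
  intro k
  induction k with
  | zero =>
    intro a0 t hk hi0 hinv
    exact pvBInv_congr p dp0 i j 0 a0 0 (j + 1) t (fun a b => by omega) hinv
  | succ k ihk =>
    intro a0 t hk hi0 hinv
    simp only [pvBDiag]
    by_cases h : a0 <= j
    · rw [if_pos h]
      obtain ⟨hlen, hrlen, hcells⟩ := hinv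
      have hat : a0 < ((t.length : Nat) : Int) := by rw [hlen]; omega
      have hbt : a0 < ((pvRow t a0).length : Int) := by
        rw [hrlen a0 (by omega)]
        have := hrows _ (pvRow_mem dp0 a0 (by omega) (by omega)); omega
      have hold : pvCell t a0 a0 = pvCell dp0 a0 a0 := by
        rw [hcells a0 a0 (by omega) (by omega), if_neg (by omega)]
      have step : pvBInv p dp0 i j 0 (a0 + 1)
          (if pvCell t a0 a0 = -1 then
            pvSet t a0 a0 ((p.length : Int) * PySem.List.pyGetD p a0 0) else t) := by
        by_cases hc : pvCell t a0 a0 = -1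
        · rw [if_pos hc]
          have h0 : pvCell dp0 a0 a0 = -1 := by rw [← hold]; exact hc
          refine ⟨by rw [length_pvSet, hlen], ?_, ?_⟩
          · intro a'' ha''
            rw [length_pvRow_pvSet t a0 a0 _ a'' (by omega) ha'' hat]
            exact hrlen a'' ha''
          · intro a' b' ha' hb'
            rw [pvCell_pvSet t a0 a0 _ a' b' (by omega) (by omega) ha' hb' hat hbt]
            by_cases hp : a' = a0 ∧ b' = a0
            · obtain ⟨h1, h2⟩ := hp
              rw [if_pos ⟨h1, h2⟩, h1, h2, if_pos (by omega), pvVal_diag p dp0 a0 h0]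
            · rw [if_neg hp, hcells a' b' ha' hb']
              have hne : ¬ (a' = a0 ∧ b' = a0) := hp
              by_cases hco : i <= a' ∧ a' <= b' ∧ b' <= j ∧ (b' - a' < 0 ∨ (b' - a' = 0 ∧ a' < a0))
              · rw [if_pos hco, if_pos (by omega)]
              · rw [if_neg hco, if_neg (by omega)]
        · rw [if_neg hc]
          refine ⟨hlen, hrlen, ?_⟩
          intro a' b' ha' hb'
          rw [hcells a' b' ha' hb']
          by_cases hp : a' = a0 ∧ b' = a0
          · obtain ⟨h1, h2⟩ := hp
            rw [h1, h2, if_neg (by omega), if_pos (by omega)]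
            have hc' : pvCell dp0 a0 a0 ≠ -1 := by rw [← hold]; exact hc
            rw [pvVal_hit p dp0 a0 a0 hc', ← hold]
          · have hne : ¬ (a' = a0 ∧ b' = a0) := hp
            by_cases hco : i <= a' ∧ a' <= b' ∧ b' <= j ∧ (b' - a' < 0 ∨ (b' - a' = 0 ∧ a' < a0))
            · rw [if_pos hco, if_pos (by omega)]
            · rw [if_neg hco, if_neg (by omega)]
      exact ihk (a0 + 1) _ (by omega) (by omega) step
    · rw [if_neg h]
      exact pvBInv_congr p dp0 i j 0 a0 0 (j + 1) t (fun a b => by omega) hinv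

theorem pvBInner_spec (p : List Int) (dp0 : List (List Int)) (i j g : Int)
    (hi : 0 <= i) (hg : 1 <= g) (hj : j < (p.length : Int)) (hjd : j < (dp0.length : Int))
    (hrows : ∀ r ∈ dp0, j < (r.length : Int)) :
    ∀ (k : Nat) (a0 : Int) (t : List (List Int)), (j - g + 1 - a0).toNat <= k → i <= a0 →
      pvBInv p dp0 i j g a0 t → pvBInv p dp0 i j g (j - g + 1) (pvBInner k p g (j - g) a0 t) := by
  intro k
  induction k with
  | zero =>
    intro a0 t hk hi0 hinv
    exact pvBInv_congr p dp0 i j g a0 g (j - g + 1) t (fun a b => by omega) hinv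
  | succ k ihk =>
    intro a0 t hk hi0 hinv
    simp only [pvBInner]
    by_cases h : a0 <= j - g
    · rw [if_pos h]
      obtain ⟨hlen, hrlen, hcells⟩ := hinv
      have hat : a0 < ((t.length : Nat) : Int) := by rw [hlen]; omega
      have hbt : a0 + g < ((pvRow t a0).length : Int) := by
        rw [hrlen a0 (by omega)]
        have := hrows _ (pvRow_mem dp0 a0 (by omega) (by omega)); omega
      have hold : pvCell t a0 (a0 + g) = pvCell dp0 a0 (a0 + g) := by
        rw [hcells a0 (a0 + g) (by omega) (by omega), if_neg (by omega)]
      have hnb1 : pvCell t (a0 + 1) (a0 + g) = pvVal p dp0 (a0 + 1) (a0 + g) := by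
        rw [hcells (a0 + 1) (a0 + g) (by omega) (by omega), if_pos (by omega)]
      have hnb2 : pvCell t a0 (a0 + g - 1) = pvVal p dp0 a0 (a0 + g - 1) := by
        rw [hcells a0 (a0 + g - 1) (by omega) (by omega), if_pos (by omega)]
      have step : pvBInv p dp0 i j g (a0 + 1)
          (if pvCell t a0 (a0 + g) = -1 then
            pvSet t a0 (a0 + g)
              (max (((p.length : Int) - (a0 + g) + a0) * PySem.List.pyGetD p a0 0 + pvCell t (a0 + 1) (a0 + g))
                   (((p.length : Int) - (a0 + g) + a0) * PySem.List.pyGetD p (a0 + g) 0 + pvCell t a0 (a0 + g - 1)))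
           else t) := by
        by_cases hc : pvCell t a0 (a0 + g) = -1
        · rw [if_pos hc]
          have h0 : pvCell dp0 a0 (a0 + g) = -1 := by rw [← hold]; exact hc
          have hveq := pvVal_rec p dp0 a0 (a0 + g) h0 (by omega)
          refine ⟨by rw [length_pvSet, hlen], ?_, ?_⟩
          · intro a'' ha''
            rw [length_pvRow_pvSet t a0 (a0 + g) _ a'' (by omega) ha'' hat]
            exact hrlen a'' ha''
          · intro a' b' ha' hb'
            rw [pvCell_pvSet t a0 (a0 + g) _ a' b' (by omega) (by omega) ha' hb' hat hbt]
            by_cases hp : a' = a0 ∧ b' = a0 + g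
            · obtain ⟨h1, h2⟩ := hp
              rw [if_pos ⟨h1, h2⟩, h1, h2, if_pos (by omega), hnb1, hnb2, hveq]
            · rw [if_neg hp, hcells a' b' ha' hb']
              have hne : ¬ (a' = a0 ∧ b' = a0 + g) := hp
              by_cases hco : i <= a' ∧ a' <= b' ∧ b' <= j ∧ (b' - a' < g ∨ (b' - a' = g ∧ a' < a0))
              · rw [if_pos hco, if_pos (by omega)]
              · rw [if_neg hco, if_neg (by omega)]
        · rw [if_neg hc]
          refine ⟨hlen, hrlen, ?_⟩
          intro a' b' ha' hb'
          rw [hcells a' b' ha' hb']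
          by_cases hp : a' = a0 ∧ b' = a0 + g
          · obtain ⟨h1, h2⟩ := hp
            rw [h1, h2, if_neg (by omega), if_pos (by omega)]
            have hc' : pvCell dp0 a0 (a0 + g) ≠ -1 := by rw [← hold]; exact hc
            rw [pvVal_hit p dp0 a0 (a0 + g) hc', ← hold]
          · have hne : ¬ (a' = a0 ∧ b' = a0 + g) := hp
            by_cases hco : i <= a' ∧ a' <= b' ∧ b' <= j ∧ (b' - a' < g ∨ (b' - a' = g ∧ a' < a0))
            · rw [if_pos hco, if_pos (by omega)]
            · rw [if_neg hco, if_neg (by omega)]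
      exact ihk (a0 + 1) _ (by omega) (by omega) step
    · rw [if_neg h]
      exact pvBInv_congr p dp0 i j g a0 g (j - g + 1) t (fun a b => by omega) hinv

theorem pvBGaps_spec (p : List Int) (dp0 : List (List Int)) (i j : Int)
    (hi : 0 <= i) (hij : i <= j) (hj : j < (p.length : Int)) (hjd : j < (dp0.length : Int))
    (hrows : ∀ r ∈ dp0, j < (r.length : Int)) :
    ∀ (k : Nat) (g : Int) (t : List (List Int)), (j - i + 1 - g).toNat <= k → 1 <= g →
      pvBInv p dp0 i j g i t → pvBInv p dp0 i j (j - i + 1) i (pvBGaps k p i j g t) := by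
  intro k
  induction k with
  | zero =>
    intro g t hk hg hinv
    exact pvBInv_congr p dp0 i j g i (j - i + 1) i t (fun a b => by omega) hinv
  | succ k ihk =>
    intro g t hk hg hinv
    simp only [pvBGaps]
    by_cases h : g <= j - i
    · rw [if_pos h]
      have hin := pvBInner_spec p dp0 i j g hi hg hj hjd hrows (j - g + 1 - i).toNat i t
        le_rfl le_rfl hinv
      have hin' := pvBInv_congr p dp0 i j g (j - g + 1) (g + 1) i _ (fun a b => by omega) hin
      exact ihk (g + 1) _ (by omega) (by omega) hin'
    · rw [if_neg h]
      exact pvBInv_congr p dp0 i j g i (j - i + 1) i t (fun a b => by omega) hinv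

-- ===== VERDICT (by name: the statement is the Claim_ definition above) =====
theorem f_topdown_spec : Claim_equal_f_topdown := by
  intro p i j dp _ hpre
  rcases hpre with ⟨_, _, hne⟩ | ⟨hi, hij, hjp, hjd, hrows⟩
  · unfold Spec_f_topdown f_topdown f_topdown_alt
    simp only [pvFA]
    rw [if_pos hne, if_pos hne]
  unfold Spec_f_topdown f_topdown f_topdown_alt
  have hA : (pvFA ((j - i).toNat + 1) p i j dp).1 = pvVal p dp i j :=
    (pvFA_spec p dp ((j - i).toNat + 1) i j dp
      ⟨rfl, fun _ _ => rfl, fun a b _ _ => Or.inl rfl⟩ hi hij hjp hjd hrows (by omega)).1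
  rw [hA]
  by_cases hc : pvCell dp i j = -1
  · rw [if_neg (not_not_intro hc)]
    have hinv0 : pvBInv p dp i j 0 i dp :=
      ⟨rfl, fun _ _ => rfl, fun a b ha hb => by rw [if_neg (by omega)]⟩
    have h1 := pvBDiag_spec p dp i j hi hjp hjd hrows (j + 1 - i).toNat i dp le_rfl le_rfl hinv0
    have h1' := pvBInv_congr p dp i j 0 (j + 1) 1 i _ (fun a b => by omega) h1
    have h2 := pvBGaps_spec p dp i j hi hij hjp hjd hrows (j - i).toNat 1 _ (by omega)
      le_rfl h1'
    obtain ⟨_, _, hcells⟩ := h2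
    rw [hcells i j hi (by omega), if_pos (by omega)]
  · rw [if_pos hc, pvVal_hit p dp i j hc]
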